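-- pv_equiv track=rewrite | github.com/Krishchudasama09/git-repo | typing speed.py | mistek
-- ===== SOURCE A (Python) =====
-- def mistek(peratest, usertest):
--     error = 0
--     min_length = min(len(peratest), len(usertest))
--
--     for i in range(min_length):
--         if peratest[i] != usertest[i]:
--             error += 1
--
--     error += abs(len(peratest) - len(usertest))
--     return error
-- ===== SOURCE B (Python) =====
-- def mistek(peratest, usertest):
--     # Consume both strings head-first; when one runs out, the whole remainder
--     # of the other is the length-difference penalty.
--     error = 0
--     p, u = peratest, usertest
--     while p and u:
--         if p[0] != u[0]:
--             error += 1
--         p, u = p[1:], u[1:]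
--     return error + len(p) + len(u)
-- ===== Notes on version B (the rewrite author's own statement) =====
-- stated objective: alternative
-- what changed: B consumes both strings head-first with an accumulator (a tail-recursive/while decomposition with no indexing), and replaces A's min(len,len) range loop and separate abs(len-len) term by adding the leftover tails' lengths when one string runs out.
import Mathlib
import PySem

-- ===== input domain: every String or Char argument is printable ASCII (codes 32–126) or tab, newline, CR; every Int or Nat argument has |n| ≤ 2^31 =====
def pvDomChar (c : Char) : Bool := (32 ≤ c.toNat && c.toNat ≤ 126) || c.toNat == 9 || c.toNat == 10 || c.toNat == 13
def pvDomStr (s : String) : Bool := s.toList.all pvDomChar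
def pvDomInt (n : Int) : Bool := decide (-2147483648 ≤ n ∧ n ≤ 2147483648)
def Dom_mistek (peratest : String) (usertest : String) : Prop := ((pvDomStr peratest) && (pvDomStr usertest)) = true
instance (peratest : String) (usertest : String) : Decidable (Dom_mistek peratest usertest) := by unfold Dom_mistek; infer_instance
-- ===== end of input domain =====

-- B consumes both strings head-first with an accumulator, adding the leftover tails' lengths when
-- one runs out, replacing A's range(min_length) index loop plus the separate abs term (objective: alternative).

-- ===== PORT A =====
-- A's for-loop over range(min_length): walk both strings in step, adding 1 per mismatched pair
def mistekLoop : List Char → List Char → Int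
  | a :: as, b :: bs => (if a ≠ b then 1 else 0) + mistekLoop as bs
  | _, _ => 0

def mistek (peratest : String) (usertest : String) : Int :=
  mistekLoop peratest.toList usertest.toList
    + |(peratest.toList.length : Int) - (usertest.toList.length : Int)|

-- ===== PORT B =====
-- B's while loop: strip one char from each string per step, accumulating mismatches;
-- when either is empty, add both remaining lengths.
def mistekAltLoop : List Char → List Char → Int → Int
  | a :: as, b :: bs, e => mistekAltLoop as bs (if a ≠ b then e + 1 else e)
  | p, u, e => e + (p.length : Int) + (u.length : Int)

def mistek_alt (peratest : String) (usertest : String) : Int :=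
  mistekAltLoop peratest.toList usertest.toList 0

-- ===== PRECONDITION & SPEC =====
def Spec_mistek (peratest : String) (usertest : String) (out : Int) : Prop := out = mistek_alt peratest usertest
instance (peratest : String) (usertest : String) (out : Int) : Decidable (Spec_mistek peratest usertest out) := by unfold Spec_mistek; infer_instance

-- ===== CLAIM =====
def Claim_equal_mistek : Prop := ∀ (peratest : String) (usertest : String), Dom_mistek peratest usertest → Spec_mistek peratest usertest (mistek peratest usertest)

-- ===== LEMMAS AND PROOFS =====
theorem mistek_key (l₁ l₂ : List Char) (e : Int) :
    mistekAltLoop l₁ l₂ e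
      = e + mistekLoop l₁ l₂ + |(l₁.length : Int) - (l₂.length : Int)| := by
  induction l₁ generalizing l₂ e with
  | nil =>
    cases l₂ <;>
      simp only [mistekAltLoop, mistekLoop, Int.abs_eq_natAbs, List.length_nil,
        List.length_cons] <;> omega
  | cons a as ih =>
    cases l₂ with
    | nil =>
      simp only [mistekAltLoop, mistekLoop, Int.abs_eq_natAbs, List.length_nil,
        List.length_cons]
      omega
    | cons b bs =>
      by_cases hab : a = b <;>
        simp only [mistekAltLoop, mistekLoop, ih, hab, ne_eq, not_true_eq_false,
          not_false_eq_true, if_true, if_false,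
          Int.abs_eq_natAbs, List.length_cons] <;> omega

-- ===== VERDICT =====
theorem mistek_spec : Claim_equal_mistek := by
  intro p u _
  unfold Spec_mistek mistek mistek_alt
  rw [mistek_key]
  omega
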